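-- pv_equiv track=rewrite | github.com/ZhiqiLi-github/Web | src/parser.py | wildcard_parser
-- ===== SOURCE A (Python) =====
-- def wildcard_parser(word):
--     if len(word) != 1:
--         raise Exception("Wildcard search only supports single word")
--     word = word[0].strip()
--
--     if word[0] != '*':
--         word = '$'+word
--     if word[-1] != '*':
--         word = word + '$'
--
--     word_list = word.split('*')
--     ret = []
--     for word in word_list:
--         ret.extend(word[i : i+2] for i in range(len(word)-1))
--
--     return ret
-- ===== SOURCE B (Python) =====
-- # B: same preamble, but replaces split('*') + nested loop by one pairwise-zip
-- # comprehension over the padded word, keeping bigrams whose chars are both non-'*'.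
-- def wildcard_parser(word):
--     if len(word) != 1:
--         raise Exception("Wildcard search only supports single word")
--     w = word[0].strip()
--     if w[0] != '*':
--         w = '$' + w
--     if w[-1] != '*':
--         w = w + '$'
--     return [a + b for a, b in zip(w, w[1:]) if a != '*' and b != '*']
-- ===== Notes on version B (the rewrite author's own statement) =====
-- stated objective: idiomatic
-- what changed: Replaces split('*') plus a nested per-piece index loop with a single pairwise zip comprehension over the padded word that keeps adjacent pairs not touching a '*'; Pre_ excludes only the inputs where A raises (length != 1, or the single word strips to empty, an IndexError).
import Mathlib
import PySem

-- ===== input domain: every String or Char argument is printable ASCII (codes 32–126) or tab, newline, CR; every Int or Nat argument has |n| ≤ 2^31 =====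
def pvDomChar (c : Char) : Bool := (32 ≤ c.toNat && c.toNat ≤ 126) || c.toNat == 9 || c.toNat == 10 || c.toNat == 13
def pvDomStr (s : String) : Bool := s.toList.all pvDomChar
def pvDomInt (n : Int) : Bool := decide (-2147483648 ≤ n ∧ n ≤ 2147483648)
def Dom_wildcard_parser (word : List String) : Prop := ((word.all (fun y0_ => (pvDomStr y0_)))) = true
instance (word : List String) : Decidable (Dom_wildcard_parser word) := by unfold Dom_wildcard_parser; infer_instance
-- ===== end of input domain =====

-- B replaces A's split('*') + nested bigram loop by a single pairwise-zip comprehension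
-- over the padded word (idiomatic, same cost); equivalence proved on all inputs where A returns.


-- ===== PORT A =====
-- 'ret.extend(word[i:i+2] for i in range(len(word)-1))' for one piece of the split
def pvBigrams (w : List Char) : List String :=
  (PySem.List.pyRange 0 ((w.length : Int) - 1) 1).map
    (fun i => String.ofList (PySem.List.slice w (some i) (some (i + 2))))

def wildcard_parser (word : List String) : List String :=
  if word.length = 1 then
    match PySem.List.pyGet? word 0 with
    | some w0 =>
      let s0 := PySem.Chars.strip w0.toList
      match PySem.List.pyGet? s0 0 with
      | some c0 =>
        let s1 := if c0 ≠ '*' then '$' :: s0 else s0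
        let s2 := if PySem.List.pyGet? s1 (-1) ≠ some '*' then s1 ++ ['$'] else s1
        (PySem.Chars.splitOn s2 ['*']).foldl (fun ret w => ret ++ pvBigrams w) []
      | none => []    -- word[0] raises IndexError (stripped word empty); excluded by Pre_
    | none => []
  else []             -- 'raise Exception(...)'; excluded by Pre_

-- ===== PORT B =====
-- '[a + b for a, b in zip(w, w[1:]) if a != '*' and b != '*']'
def pvPairs (s : List Char) : List String :=
  ((s.zip s.tail).filter (fun p => p.1 != '*' && p.2 != '*')).map
    (fun p => String.ofList [p.1, p.2])

def wildcard_parser_alt (word : List String) : List String :=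
  match word with
  | [w] =>
    match PySem.Chars.strip w.toList with
    | [] => []        -- w[0] raises IndexError; excluded by Pre_
    | c :: cs =>
      let s := if c ≠ '*' then '$' :: c :: cs else c :: cs
      let s := if s.getLastD ' ' ≠ '*' then s ++ ['$'] else s
      pvPairs s
  | _ => []           -- raise; excluded by Pre_

-- ===== PRECONDITION & SPEC =====
-- Pre_ excludes exactly the inputs where A raises: lists not of length 1 (Exception),
-- and a single word that strips to the empty string (IndexError on word[0]).
def Pre_wildcard_parser (word : List String) : Prop :=
  word.length = 1 ∧ PySem.Chars.strip word.headI.toList ≠ []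
instance (word : List String) : Decidable (Pre_wildcard_parser word) := by
  unfold Pre_wildcard_parser; infer_instance

def pvWitness_wildcard_parser : List String := ["ab*cd"]

def Spec_wildcard_parser (word : List String) (out : List String) : Prop := out = wildcard_parser_alt word
instance (word : List String) (out : List String) : Decidable (Spec_wildcard_parser word out) := by unfold Spec_wildcard_parser; infer_instance

-- ===== CLAIM (what is proved, stated in full; the proofs are below) =====
def Claim_equal_wildcard_parser : Prop := ∀ (word : List String), Dom_wildcard_parser word → Pre_wildcard_parser word → Spec_wildcard_parser word (wildcard_parser word)

-- ===== LEMMAS AND PROOFS =====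

-- recursive form of Python's str.split('*') (accumulator = current piece, reversed)
def mySplit : List Char → List Char → List (List Char)
  | [], cur => [cur.reverse]
  | c :: rest, cur => if c = '*' then cur.reverse :: mySplit rest [] else mySplit rest (c :: cur)

theorem go_eq (l : List Char) (fuel : Nat) (cur : List Char) (acc : List (List Char)) (h : l.length < fuel) :
    PySem.Chars.splitOn.go ['*'] fuel l cur acc = acc.reverse ++ mySplit l cur := by
  induction l generalizing fuel cur acc with
  | nil =>
    cases fuel with
    | zero => omega
    | succ f => simp [PySem.Chars.splitOn.go, mySplit]
  | cons c rest ih =>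
    cases fuel with
    | zero => omega
    | succ f =>
      rw [PySem.Chars.splitOn.go]
      by_cases hc : c = '*'
      · subst hc
        have hp : List.isPrefixOf ['*'] ('*' :: rest) = true := by simp [List.isPrefixOf]
        simp only [hp, if_pos, List.length_cons, List.drop_succ_cons, List.length_nil,
          List.drop_zero]
        rw [ih _ _ _ (by simpa using Nat.lt_of_succ_lt_succ h)]
        simp [mySplit]
      · have hp : List.isPrefixOf ['*'] (c :: rest) = false := by
          simp [List.isPrefixOf]; exact fun he => absurd he.symm hc
        simp only [hp, Bool.false_eq_true, if_false]
        rw [ih _ _ _ (by simpa using Nat.lt_of_succ_lt_succ h)]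
        simp [mySplit, hc]

theorem splitOn_eq (l : List Char) : PySem.Chars.splitOn l ['*'] = mySplit l [] := by
  rw [PySem.Chars.splitOn, go_eq l _ _ _ (by omega)]; rfl

-- recursive form of B's filtered pairwise comprehension
def pairsR : List Char → List String
  | a :: b :: r => (if a ≠ '*' ∧ b ≠ '*' then [String.ofList [a, b]] else []) ++ pairsR (b :: r)
  | _ => []

theorem pvPairs_eq_pairsR (s : List Char) : pvPairs s = pairsR s := by
  induction s with
  | nil => rfl
  | cons a t ih =>
    cases t with
    | nil => rfl
    | cons b r =>
      simp only [pvPairs, List.tail_cons, List.zip_cons_cons, List.filter_cons, pairsR]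
      by_cases ha : a = '*'
      · simp only [ha, pvPairs, List.tail_cons] at ih ⊢
        simp [ih]
      · by_cases hb : b = '*'
        · simp only [hb, pvPairs, List.tail_cons] at ih ⊢
          simp [ih, ha]
        · simp only [pvPairs, List.tail_cons] at ih
          simp [ih, ha, hb]

theorem pairsR_star_cons (rest : List Char) : pairsR ('*' :: rest) = pairsR rest := by
  cases rest with
  | nil => rfl
  | cons b r => simp [pairsR]

theorem pairsR_append_star (u rest : List Char) (hu : '*' ∉ u) :
    pairsR (u ++ '*' :: rest) = pairsR u ++ pairsR ('*' :: rest) := by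
  induction u with
  | nil => simp [pairsR]
  | cons a t ih =>
    cases t with
    | nil =>
      have ha : a ≠ '*' := by simp at hu; exact fun h => hu h.symm
      simp [pairsR, pairsR_star_cons, ha]
    | cons b r =>
      have ha : a ≠ '*' := fun h => hu (h ▸ List.mem_cons_self)
      have hrest : '*' ∉ b :: r := fun h => hu (List.mem_cons_of_mem _ h)
      have hb : b ≠ '*' := fun h => hrest (h ▸ List.mem_cons_self)
      simp only [List.cons_append, pairsR, ha, hb]
      rw [show (b :: r) ++ '*' :: rest = (b :: r) ++ '*' :: rest from rfl] at *
      simp only [List.cons_append] at ih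
      rw [ih hrest]
      simp [List.append_assoc]

theorem pvBigrams_eq_pairsR (w : List Char) (hw : '*' ∉ w) : pvBigrams w = pairsR w := by
  have key : ∀ (v : List Char), '*' ∉ v →
      (List.range (v.length - 1)).map (fun k => String.ofList ((v.drop k).take 2)) = pairsR v := by
    intro v
    induction v with
    | nil => intro _; rfl
    | cons a t iht =>
      intro hv
      cases t with
      | nil => rfl
      | cons b r =>
        have ha : a ≠ '*' := fun h => hv (h ▸ List.mem_cons_self)
        have hrest : '*' ∉ b :: r := fun h => hv (List.mem_cons_of_mem _ h)
        have hb : b ≠ '*' := fun h => hrest (h ▸ List.mem_cons_self)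
        have hlen : (a :: b :: r).length - 1 = ((b :: r).length - 1) + 1 := by
          simp
        rw [hlen, List.range_succ_eq_map, List.map_cons, List.map_map]
        have htail : (List.range ((b :: r).length - 1)).map
            ((fun k => String.ofList (((a :: b :: r).drop k).take 2)) ∘ Nat.succ)
            = (List.range ((b :: r).length - 1)).map
              (fun k => String.ofList (((b :: r).drop k).take 2)) := by
          apply List.map_congr_left; intro k _; rfl
        rw [htail, iht hrest]
        simp [pairsR, ha, hb]
  -- reduce pvBigrams to the List.range form
  rw [pvBigrams, PySem.List.pyRange_one]
  have h1 : ((w.length : Int) - 1 - 0).toNat = w.length - 1 := by omega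
  rw [List.map_map, h1]
  rw [← key w hw]
  apply List.map_congr_left
  intro k hk
  simp only [Function.comp_apply, zero_add]
  rw [show ((k : Int) + 2) = ((k : Int) + ((2 : Nat) : Int)) from by push_cast; ring,
    PySem.List.slice_natCast_add]

-- core: bigrams of the split pieces = non-star adjacent pairs of the whole string
theorem mySplit_flatMap (l : List Char) : ∀ (cur : List Char), '*' ∉ cur →
    (mySplit l cur).flatMap pvBigrams = pairsR (cur.reverse ++ l) := by
  induction l with
  | nil =>
    intro cur hcur
    show List.flatMap pvBigrams [cur.reverse] = pairsR (cur.reverse ++ [])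
    rw [List.append_nil]
    simp only [List.flatMap_cons, List.flatMap_nil, List.append_nil]
    exact pvBigrams_eq_pairsR _ (by simpa using hcur)
  | cons c rest ih =>
    intro cur hcur
    by_cases hc : c = '*'
    · subst hc
      have hms : mySplit ('*' :: rest) cur = cur.reverse :: mySplit rest [] := by
        simp [mySplit]
      rw [hms, List.flatMap_cons, pvBigrams_eq_pairsR _ (by simpa using hcur), ih [] (by simp),
        pairsR_append_star _ _ (by simpa using hcur), pairsR_star_cons]
      simp [pairsR_star_cons]
    · simp only [mySplit, hc, if_false]
      rw [ih (c :: cur) (by simp [hcur]; exact fun h => hc h.symm)]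
      simp

-- A's foldl over the split = B's pairs, for any padded string
theorem core_eq (s : List Char) :
    (PySem.Chars.splitOn s ['*']).foldl (fun ret w => ret ++ pvBigrams w) [] = pvPairs s := by
  rw [PySem.List.foldl_append_eq_flatMap, splitOn_eq, mySplit_flatMap s [] (by simp),
    pvPairs_eq_pairsR]
  simp

theorem pyGet?_neg_one_getLastD (xs : List Char) (d : Char) (h : xs ≠ []) :
    PySem.List.pyGet? xs (-1) = some (xs.getLastD d) := by
  have hn : 1 ≤ xs.length := List.length_pos_iff.mpr h
  have h1 : ¬ (0 : Int) ≤ -1 := by omega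
  have h2 : -(xs.length : Int) ≤ -1 := by omega
  have hidx : PySem.List.pyIdx? xs.length (-1) = some (xs.length - 1) := by
    simp [PySem.List.pyIdx?, h1, h2]
  rw [PySem.List.pyGet?, hidx]
  show xs[xs.length - 1]? = some (xs.getLastD d)
  rw [List.getLastD_eq_getLast?, ← List.getLast?_eq_getElem?]
  cases hx : xs.getLast? with
  | none => exact absurd (List.getLast?_eq_none_iff.mp hx) h
  | some a => rfl

-- ===== VERDICT (by name: the statement is the Claim_ definition above) =====
theorem wildcard_parser_spec : Claim_equal_wildcard_parser := by
  intro word _ hpre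
  obtain ⟨hlen, hne⟩ := hpre
  match word with
  | [w] =>
    unfold Spec_wildcard_parser wildcard_parser wildcard_parser_alt
    simp only [List.headI] at hne
    cases hs : PySem.Chars.strip w.toList with
    | nil => exact absurd hs hne
    | cons c cs =>
      have hget0 : PySem.List.pyGet? (c :: cs) 0 = some c := by
        simp [PySem.List.pyGet?, PySem.List.pyIdx?]
      simp only [List.length_cons, List.length_nil, if_pos rfl, hs]
      have hgetw : PySem.List.pyGet? [w] (0 : Int) = some w := by
        simp [PySem.List.pyGet?, PySem.List.pyIdx?]
      rw [hgetw]
      simp only [hs, hget0]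
      set s1 := if c ≠ '*' then '$' :: c :: cs else c :: cs with hs1
      have hs1ne : s1 ≠ [] := by
        rw [hs1]; split_ifs <;> simp
      rw [pyGet?_neg_one_getLastD s1 ' ' hs1ne]
      rw [core_eq]
      by_cases hl : s1.getLastD ' ' = '*'
      · simp [hl]
      · simp [hl]
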